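-- pv_equiv track=rewrite | github.com/solkm/interferenceRNN | src/model_behavior_functions.py | split_by_sessions
-- ===== SOURCE A (Python) =====
-- def split_by_sessions(sess_start, a_to_split):
--     """ Split indices by sessions.
--
--     Args:
--         sess_start: a binary array indicating the start of a new session.
--         a_to_split: the array to be split.
--
--     Returns:
--         sessions: a list of sublists containings the indices of a session.
--     """
--
--     a_by_sess = []
--     sess = []
--
--     for start, entry in zip(sess_start, a_to_split):
--         if start == 1:
--             if sess:  # Append the current session if it exists
--                 a_by_sess.append(sess)
--             sess = [entry]  # Start the new session
--         else:
--             sess.append(entry)  # Continue the current session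
--
--     if sess:  # Append the last session if it exists
--         a_by_sess.append(sess)
--
--     return a_by_sess
-- ===== SOURCE B (Python) =====
-- def split_by_sessions(sess_start, a_to_split):
--     """Span-based: each session starts at position 0 or at a marker; scan
--     ahead to the next marker and emit the whole segment at once."""
--     pairs = list(zip(sess_start, a_to_split))
--     n = len(pairs)
--     out = []
--     i = 0
--     while i < n:
--         j = i + 1
--         while j < n and pairs[j][0] != 1:
--             j += 1
--         out.append([entry for _, entry in pairs[i:j]])
--         i = j
--     return out
-- ===== Notes on version B (the rewrite author's own statement) =====
-- stated objective: alternative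
-- what changed: A threads a mutable current-session accumulator through one fold and flushes it on each marker and at the end; B instead segments the zipped list by spans: each session begins at position 0 or at a marker, so it scans ahead to the next marker and emits the whole segment at once, with no accumulator state or end-of-loop flush.
import Mathlib
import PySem

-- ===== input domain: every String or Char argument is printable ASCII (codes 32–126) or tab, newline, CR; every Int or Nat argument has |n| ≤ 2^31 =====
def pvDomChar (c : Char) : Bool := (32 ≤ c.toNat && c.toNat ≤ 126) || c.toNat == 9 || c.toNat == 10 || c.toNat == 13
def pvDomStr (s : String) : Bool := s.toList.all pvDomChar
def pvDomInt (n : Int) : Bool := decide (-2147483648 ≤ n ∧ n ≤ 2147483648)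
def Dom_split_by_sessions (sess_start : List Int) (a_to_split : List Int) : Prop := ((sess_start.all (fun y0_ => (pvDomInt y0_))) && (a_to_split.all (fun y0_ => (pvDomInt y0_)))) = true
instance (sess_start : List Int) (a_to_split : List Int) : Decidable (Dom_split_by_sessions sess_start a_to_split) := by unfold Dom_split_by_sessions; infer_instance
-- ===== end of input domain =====

-- B replaces A's mutable current-session accumulator (flushed on each marker and at loop end)
-- by a span-based segmentation: each session starts at position 0 or at a marker, and the whole
-- segment up to the next marker is emitted at once.  Objective: alternative decomposition.

-- ===== PORT A =====
def split_by_sessions (sess_start : List Int) (a_to_split : List Int) : List (List Int) :=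
  let st := (sess_start.zip a_to_split).foldl
    (fun (acc : List (List Int) × List Int) (p : Int × Int) =>
      if p.1 == 1 then
        (if acc.2.isEmpty then acc.1 else acc.1 ++ [acc.2], [p.2])
      else
        (acc.1, acc.2 ++ [p.2]))
    ([], [])
  if st.2.isEmpty then st.1 else st.1 ++ [st.2]

-- ===== PORT B =====
-- inner while loop of Source B: the continuation entries up to (excluding) the next marker,
-- together with the remaining suffix starting at that marker
def pvSpanSeg : List (Int × Int) → List Int × List (Int × Int)
  | [] => ([], [])
  | q :: rest =>
    if q.1 == 1 then ([], q :: rest)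
    else
      let pr := pvSpanSeg rest
      (q.2 :: pr.1, pr.2)

theorem pvSpanSeg_length_le : ∀ l : List (Int × Int), (pvSpanSeg l).2.length ≤ l.length
  | [] => Nat.le_refl _
  | q :: rest => by
    simp only [pvSpanSeg]
    split
    · exact Nat.le_refl _
    · exact Nat.le_trans (pvSpanSeg_length_le rest) (Nat.le_succ _)

-- outer while loop of Source B: emit one whole session per iteration, jump to the next marker
def pvGo : List (Int × Int) → List (List Int)
  | [] => []
  | p :: rest =>
    (p.2 :: (pvSpanSeg rest).1) :: pvGo (pvSpanSeg rest).2
  termination_by l => l.length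
  decreasing_by simpa using Nat.lt_succ_of_le (pvSpanSeg_length_le rest)

def split_by_sessions_alt (sess_start : List Int) (a_to_split : List Int) : List (List Int) :=
  pvGo (sess_start.zip a_to_split)

-- ===== PRECONDITION & SPEC =====
def Spec_split_by_sessions (sess_start : List Int) (a_to_split : List Int) (out : List (List Int)) : Prop := out = split_by_sessions_alt sess_start a_to_split
instance (sess_start : List Int) (a_to_split : List Int) (out : List (List Int)) : Decidable (Spec_split_by_sessions sess_start a_to_split out) := by unfold Spec_split_by_sessions; infer_instance

-- ===== CLAIM (what is proved, stated in full; the proofs are below) =====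
def Claim_equal_split_by_sessions : Prop := ∀ (sess_start : List Int) (a_to_split : List Int), Dom_split_by_sessions sess_start a_to_split → Spec_split_by_sessions sess_start a_to_split (split_by_sessions sess_start a_to_split)

-- ===== LEMMAS AND PROOFS =====

theorem pvGo_nil : pvGo [] = [] := by rw [pvGo]

theorem pvGo_cons (p : Int × Int) (rest : List (Int × Int)) :
    pvGo (p :: rest) = (p.2 :: (pvSpanSeg rest).1) :: pvGo (pvSpanSeg rest).2 := by rw [pvGo]

-- abbreviations for A's loop body and final flush (proof-side only)
def pvStep (acc : List (List Int) × List Int) (p : Int × Int) : List (List Int) × List Int :=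
  if p.1 == 1 then
    (if acc.2.isEmpty then acc.1 else acc.1 ++ [acc.2], [p.2])
  else
    (acc.1, acc.2 ++ [p.2])

def pvFinish (st : List (List Int) × List Int) : List (List Int) :=
  if st.2.isEmpty then st.1 else st.1 ++ [st.2]

-- invariant of A's fold: with a nonempty current session s, the finished result is
-- acc, then s extended by the current span, then the sessions of the rest
theorem pvFold_inv : ∀ (l : List (Int × Int)) (acc : List (List Int)) (s : List Int), s ≠ [] →
    pvFinish (l.foldl pvStep (acc, s)) =
      acc ++ ((s ++ (pvSpanSeg l).1) :: pvGo (pvSpanSeg l).2) := by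
  intro l
  induction l with
  | nil =>
    intro acc s hs
    simp [pvFinish, pvSpanSeg, pvGo_nil, List.isEmpty_iff, hs]
  | cons q rest ih =>
    intro acc s hs
    by_cases hq : q.1 = 1
    · have hstep : pvStep (acc, s) q = (acc ++ [s], [q.2]) := by
        simp [pvStep, hq, List.isEmpty_iff, hs]
      rw [List.foldl_cons, hstep, ih (acc ++ [s]) [q.2] (by simp)]
      simp [pvSpanSeg, hq, pvGo_cons]
    · have hstep : pvStep (acc, s) q = (acc, s ++ [q.2]) := by
        simp [pvStep, hq]
      rw [List.foldl_cons, hstep, ih acc (s ++ [q.2]) (by simp)]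
      simp [pvSpanSeg, hq]

theorem pvMain : ∀ (l : List (Int × Int)), pvFinish (l.foldl pvStep ([], [])) = pvGo l := by
  intro l
  cases l with
  | nil => simp [pvFinish, pvGo_nil]
  | cons q rest =>
    have hstep : pvStep ([], []) q = ([], [q.2]) := by
      by_cases hq : q.1 = 1 <;> simp [pvStep, hq]
    rw [List.foldl_cons, hstep, pvFold_inv rest [] [q.2] (by simp), pvGo_cons]
    simp

-- ===== VERDICT (by name: the statement is the Claim_ definition above) =====
theorem split_by_sessions_spec : Claim_equal_split_by_sessions := by
  intro sess_start a_to_split _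
  show split_by_sessions sess_start a_to_split = split_by_sessions_alt sess_start a_to_split
  unfold split_by_sessions split_by_sessions_alt
  exact pvMain (sess_start.zip a_to_split)
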